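-- pv_equiv track=rewrite | github.com/jaid-monwar/tree-sitter-codeviews | src/comex/codeviews/CFG/CFG_cpp.py | _match_template_pattern
-- ===== SOURCE A (Python) =====
-- def _match_template_pattern(pattern, args):
--     """
--     Check if template arguments match a partial specialization pattern.
--
--     Args:
--         pattern: List of pattern strings from partial specialization (e.g., ["T", "T"])
--         args: List of actual template arguments (e.g., ["int", "int"])
--
--     Returns:
--         True if args match the pattern, False otherwise
--     """
--     if len(pattern) != len(args):
--         return False
--
--     # Build a mapping from template parameters to actual types
--     param_map = {}
--
--     for p, a in zip(pattern, args):
--         # Normalize strings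
--         p_norm = p.replace(" ", "")
--         a_norm = a.replace(" ", "")
--
--         # Check for pointer pattern (e.g., "T*")
--         if p_norm.endswith("*"):
--             # Extract base type
--             base_p = p_norm[:-1]
--             # Check if argument is a pointer
--             if not a_norm.endswith("*"):
--                 return False
--             base_a = a_norm[:-1]
--
--             # Check if base types match the pattern
--             if base_p in param_map:
--                 if param_map[base_p] != base_a:
--                     return False
--             else:
--                 param_map[base_p] = base_a
--         else:
--             # Direct type or template parameter
--             if p_norm in param_map:
--                 # We've seen this parameter before - must match
--                 if param_map[p_norm] != a_norm:
--                     return False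
--             else:
--                 # New parameter - record it
--                 # Check if this looks like a template parameter (single letter or "typename ...")
--                 if len(p_norm) == 1 and p_norm.isupper():
--                     param_map[p_norm] = a_norm
--                 elif p_norm == a_norm:
--                     # Exact type match
--                     continue
--                 else:
--                     # Pattern doesn't match
--                     return False
--
--     return True
-- ===== SOURCE B (Python) =====
-- def _key_ok(key, occs):
--     # occs: the (value, binds) occurrences of this key, in order.  The key's
--     # occurrences are consistent iff every occurrence before the first binding
--     # one literally equals the key, and every one from the first binding
--     # occurrence on equals that binder's value.
--     flags = [b for _, b in occs]
--     if True in flags: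
--         i0 = flags.index(True)
--         w = occs[i0][0]
--         return all(v == key for v, _ in occs[:i0]) and all(v == w for v, _ in occs[i0:])
--     return all(v == key for v, _ in occs)
--
--
-- def _match_template_pattern(pattern, args):
--     if len(pattern) != len(args):
--         return False
--     # Normalize every pair into a (key, value, binds) triple; a pointer pattern
--     # whose argument is not a pointer can never match.
--     triples = []
--     for p, a in zip(pattern, args):
--         p_n = p.replace(" ", "")
--         a_n = a.replace(" ", "")
--         if p_n.endswith("*"):
--             if not a_n.endswith("*"):
--                 return False
--             triples.append((p_n[:-1], a_n[:-1], True))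
--         else:
--             triples.append((p_n, a_n, len(p_n) == 1 and p_n.isupper()))
--     # Check each distinct key's occurrence list independently.
--     keys = list(dict.fromkeys(k for k, _, _ in triples))
--     return all(_key_ok(k, [(v, b) for k2, v, b in triples if k2 == k]) for k in keys)
-- ===== Notes on version B (the rewrite author's own statement) =====
-- stated objective: alternative
-- what changed: A threads a binding dict through one sequential loop; B has no environment at all: it normalizes the pairs into (key,value,binds) triples and then verifies each distinct key's occurrence list independently, locating the first binding occurrence with index() and checking the slice before it against the key literal and the slice from it on against that binder's value.
import Mathlib
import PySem

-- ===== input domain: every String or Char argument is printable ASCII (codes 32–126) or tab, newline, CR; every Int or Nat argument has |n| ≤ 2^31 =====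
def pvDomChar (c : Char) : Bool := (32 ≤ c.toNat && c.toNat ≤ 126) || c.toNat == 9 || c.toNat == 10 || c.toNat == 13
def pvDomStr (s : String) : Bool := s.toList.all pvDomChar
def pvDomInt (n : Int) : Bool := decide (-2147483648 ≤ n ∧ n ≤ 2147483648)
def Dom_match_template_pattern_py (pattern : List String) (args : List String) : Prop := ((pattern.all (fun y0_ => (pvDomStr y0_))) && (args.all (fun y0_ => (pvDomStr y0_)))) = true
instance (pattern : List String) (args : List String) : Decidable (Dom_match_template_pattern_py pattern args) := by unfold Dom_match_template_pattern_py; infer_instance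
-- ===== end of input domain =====

-- B drops A's binding environment (a dict threaded through one sequential loop) and instead
-- normalizes the pairs into (key, value, binds) triples and verifies each distinct key's
-- occurrence list independently: prefix before the first binding occurrence must equal the
-- key literal, the rest must equal that binder's value. Alternative decomposition, same cost class.


-- ===== PORT A =====
-- shared string helpers (both Pythons call .replace(" ", "") and .isupper())
def pvStrip (s : String) : String := PySem.Str.replace s " " ""
-- str.isupper(), hand-ported (PySem has only the per-char isupper): exact on the ASCII
-- domain, where a char is cased iff it is an upper or lower letter.
def pvIsUpper (s : String) : Bool :=
  s.toList.any PySem.Chars.isupper && s.toList.all (fun c => !(PySem.Chars.islower c))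

def pvALoop (env : PySem.Dict String String) : List (String × String) → Bool
  | [] => true
  | (p, a) :: rest =>
    let p_norm := pvStrip p
    let a_norm := pvStrip a
    if PySem.Str.endswith p_norm "*" then
      let base_p := PySem.Str.slice p_norm none (some (-1))
      if !PySem.Str.endswith a_norm "*" then false
      else
        let base_a := PySem.Str.slice a_norm none (some (-1))
        match env.get? base_p with
        | some v => if v ≠ base_a then false else pvALoop env rest
        | none => pvALoop (env.insert base_p base_a) rest
    else
      match env.get? p_norm with
      | some v => if v ≠ a_norm then false else pvALoop env rest
      | none =>
        if PySem.Str.len p_norm == 1 && pvIsUpper p_norm then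
          pvALoop (env.insert p_norm a_norm) rest
        else if p_norm == a_norm then pvALoop env rest
        else false

def match_template_pattern_py (pattern : List String) (args : List String) : Bool :=
  if pattern.length ≠ args.length then false
  else pvALoop (PySem.Dict.ofList []) (pattern.zip args)

-- ===== PORT B =====
-- normalize every pair into a (key, value, binds) triple;
-- none = early False on a pointer-pattern pair whose argument is not a pointer
def pvClassify : List (String × String) → Option (List (String × String × Bool))
  | [] => some []
  | (p, a) :: rest =>
    let p_n := pvStrip p
    let a_n := pvStrip a
    if PySem.Str.endswith p_n "*" then
      if !PySem.Str.endswith a_n "*" then none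
      else (pvClassify rest).map
        (fun ts => (PySem.Str.slice p_n none (some (-1)), PySem.Str.slice a_n none (some (-1)), true) :: ts)
    else
      (pvClassify rest).map
        (fun ts => (p_n, a_n, PySem.Str.len p_n == 1 && pvIsUpper p_n) :: ts)

-- _key_ok(key, occs): find the first binding occurrence; the prefix before it must equal
-- the key literal and everything from it on must equal that binder's value.
-- ('flags.index(True)' cannot raise under the 'True in flags' guard, which the match on
-- index? realizes; 'occs[i0]' cannot raise since i0 < len(occs), so pyGetD's default is dead.)
def pvKeyOk (key : String) (occs : List (String × Bool)) : Bool :=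
  let flags := occs.map (·.2)
  match PySem.List.index? flags true with
  | some i0 =>
    let w := (PySem.List.pyGetD occs (i0 : Int) ("", true)).1
    (PySem.List.slice occs none (some (i0 : Int))).all (fun t => t.1 == key) &&
    (PySem.List.slice occs (some (i0 : Int)) none).all (fun t => t.1 == w)
  | none => occs.all (fun t => t.1 == key)

def match_template_pattern_py_alt (pattern : List String) (args : List String) : Bool :=
  if pattern.length ≠ args.length then false
  else
    match pvClassify (pattern.zip args) with
    | none => false
    | some ts =>
      (PySem.List.dedup (ts.map (·.1))).all (fun k =>
        pvKeyOk k ((ts.filter (fun t => t.1 == k)).map (fun t => (t.2.1, t.2.2))))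

-- ===== PRECONDITION & SPEC =====
def Spec_match_template_pattern_py (pattern : List String) (args : List String) (out : Bool) : Prop := out = match_template_pattern_py_alt pattern args
instance (pattern : List String) (args : List String) (out : Bool) : Decidable (Spec_match_template_pattern_py pattern args out) := by unfold Spec_match_template_pattern_py; infer_instance

-- ===== CLAIM (what is proved, stated in full; the proofs are below) =====
def Claim_equal_match_template_pattern_py : Prop := ∀ (pattern : List String) (args : List String), Dom_match_template_pattern_py pattern args → Spec_match_template_pattern_py pattern args (match_template_pattern_py pattern args)

-- ===== LEMMAS AND PROOFS =====

-- A's loop body on an already-classified triple list (proof-only intermediate form)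
def pvSolve (env : PySem.Dict String String) : List (String × String × Bool) → Bool
  | [] => true
  | (key, val, binds) :: rest =>
    match env.get? key with
    | some w => if w == val then pvSolve env rest else false
    | none =>
      if binds then pvSolve (env.insert key val) rest
      else if key == val then pvSolve env rest
      else false

-- per-key sequential check with an optional current binding (proof-only)
def pvCheckSeq (o : Option String) (key : String) : List (String × Bool) → Bool
  | [] => true
  | (v, b) :: r =>
    match o with
    | some w => (v == w) && pvCheckSeq (some w) key r
    | none => if b then pvCheckSeq (some v) key r else (v == key) && pvCheckSeq none key r

-- the occurrences of key k in a triple list, as B builds them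
def pvOccs (ts : List (String × String × Bool)) (k : String) : List (String × Bool) :=
  (ts.filter (fun t => t.1 == k)).map (fun t => (t.2.1, t.2.2))

theorem pvALoop_eq (l : List (String × String)) :
    ∀ env, pvALoop env l =
      match pvClassify l with
      | none => false
      | some ts => pvSolve env ts := by
  induction l with
  | nil => intro env; simp [pvALoop, pvClassify, pvSolve]
  | cons pa rest ih =>
    intro env
    obtain ⟨p, a⟩ := pa
    by_cases hp : PySem.Str.endswith (pvStrip p) "*" = true
    · by_cases ha : PySem.Str.endswith (pvStrip a) "*" = true
      · simp only [pvALoop, pvClassify, hp, ha, Bool.not_true, if_true, if_false,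
          Bool.false_eq_true]
        cases hclass : pvClassify rest <;>
          cases hget : env.get? (PySem.Str.slice (pvStrip p) none (some (-1))) <;>
            simp only [hclass, hget, Option.map_none, Option.map_some, pvSolve, ih] <;>
              split_ifs <;> simp_all
      · simp only [PySem.Str.endswith_eq, show "*".toList = ['*'] from rfl] at hp ha
        simp [pvALoop, pvClassify, hp, ha]
    · simp only [pvALoop, pvClassify, hp, Bool.false_eq_true, ite_false]
      cases hclass : pvClassify rest <;>
        cases hget : env.get? (pvStrip p) <;>
          simp only [hclass, hget, Option.map_none, Option.map_some, pvSolve, ih] <;>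
            split_ifs <;> simp_all

theorem pvCheckSeq_some (w key : String) (occs : List (String × Bool)) :
    pvCheckSeq (some w) key occs = occs.all (fun t => t.1 == w) := by
  induction occs with
  | nil => rfl
  | cons t r ih => obtain ⟨v, b⟩ := t; simp [pvCheckSeq, ih]

theorem pvKeyOk_eq (key : String) (occs : List (String × Bool)) :
    pvKeyOk key occs = pvCheckSeq none key occs := by
  induction occs with
  | nil => rfl
  | cons t r ih =>
    obtain ⟨v, b⟩ := t
    cases b with
    | true =>
      rw [pvKeyOk]
      simp only [List.map_cons, PySem.List.index?_cons_self]
      simp [pvCheckSeq, pvCheckSeq_some, PySem.List.slice_to, PySem.List.slice_from,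
        PySem.List.pyGetD_natCast]
    | false =>
      rw [pvKeyOk]
      simp only [List.map_cons]
      rw [PySem.List.index?_cons_of_ne _ (by simp)]
      cases hidx : PySem.List.index? (r.map (·.2)) true with
      | none =>
        rw [pvKeyOk] at ih
        simp only [hidx] at ih
        simp [pvCheckSeq, ← ih]
      | some j =>
        rw [pvKeyOk] at ih
        simp only [hidx] at ih
        simp only [Option.map_some]
        rw [show pvCheckSeq none key ((v, false) :: r) =
              ((v == key) && pvCheckSeq none key r) from by simp [pvCheckSeq]]
        rw [← ih]
        simp only [PySem.List.pyGetD_natCast, PySem.List.slice_to_natCast,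
          PySem.List.slice_from_natCast, List.take_succ_cons, List.drop_succ_cons,
          List.getD_cons_succ, List.all_cons]
        simp [Bool.and_assoc]

theorem pvOccs_of_not_mem (ts : List (String × String × Bool)) (k : String)
    (h : k ∉ ts.map (·.1)) : pvOccs ts k = [] := by
  unfold pvOccs
  rw [List.filter_eq_nil_iff.mpr, List.map_nil]
  intro t ht
  simp only [beq_iff_eq]
  intro hk
  exact h (List.mem_map.mpr ⟨t, ht, hk⟩)

theorem pv_ball_cons {α : Type} [DecidableEq α] (k : α) (ks : List α) (P : α → Prop)
    (h : k ∉ ks → P k) : (∀ x ∈ k :: ks, P x) ↔ (∀ x ∈ ks, P x) := by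
  constructor
  · intro H x hx; exact H x (List.mem_cons_of_mem _ hx)
  · intro H x hx
    rcases List.mem_cons.mp hx with rfl | hx'
    · by_cases hk : x ∈ ks
      · exact H x hk
      · exact h hk
    · exact H x hx'

theorem pvSolve_eq_forall (ts : List (String × String × Bool)) :
    ∀ env, (pvSolve env ts = true ↔
      ∀ k ∈ ts.map (·.1), pvCheckSeq (env.get? k) k (pvOccs ts k) = true) := by
  induction ts with
  | nil => intro env; simp [pvSolve]
  | cons t ts' ih =>
    intro env
    obtain ⟨k, v, b⟩ := t
    have hocc : ∀ k', pvOccs ((k, v, b) :: ts') k' =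
        if k = k' then (v, b) :: pvOccs ts' k' else pvOccs ts' k' := by
      intro k'
      unfold pvOccs
      by_cases h : k = k' <;> simp [h]
    have hnil : ∀ (env' : PySem.Dict String String) k', k' ∉ ts'.map (·.1) →
        pvCheckSeq (env'.get? k') k' (pvOccs ts' k') = true := by
      intro env' k' hk'
      rw [pvOccs_of_not_mem _ _ hk']
      cases env'.get? k' <;> rfl
    cases hget : env.get? k with
    | some w =>
      by_cases hwv : w = v
      · -- repeat of a bound key with the right value: the pair is absorbed
        subst hwv
        have hpt : ∀ k', pvCheckSeq (env.get? k') k' (pvOccs ((k, w, b) :: ts') k') =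
            pvCheckSeq (env.get? k') k' (pvOccs ts' k') := by
          intro k'
          rw [hocc k']
          by_cases hkk : k = k'
          · subst hkk; rw [if_pos rfl, hget]; simp [pvCheckSeq]
          · rw [if_neg hkk]
        have hstep : pvSolve env ((k, w, b) :: ts') = pvSolve env ts' := by
          simp [pvSolve, hget]
        rw [hstep, ih env, List.map_cons]
        simp only [hpt]
        exact (pv_ball_cons k _ _ (fun h => hnil env k h)).symm
      · have hstep : pvSolve env ((k, v, b) :: ts') = false := by
          simp [pvSolve, hget, hwv, beq_iff_eq]
        rw [hstep]
        constructor
        · intro hs; cases hs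
        · intro hall
          have hk := hall k (by simp)
          rw [hocc k, if_pos rfl] at hk
          simp only [pvCheckSeq, hget, Bool.and_eq_true, beq_iff_eq] at hk
          exact (hwv hk.1.symm).elim
    | none =>
      cases b with
      | true =>
        -- new binding: env gains k ↦ v
        have hpt : ∀ k', pvCheckSeq (env.get? k') k' (pvOccs ((k, v, true) :: ts') k') =
            pvCheckSeq ((env.insert k v).get? k') k' (pvOccs ts' k') := by
          intro k'
          rw [hocc k']
          by_cases hkk : k = k'
          · subst hkk
            rw [if_pos rfl, hget, PySem.Dict.get?_insert_self]
            simp [pvCheckSeq]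
          · rw [if_neg hkk, PySem.Dict.get?_insert_of_ne _ _ (fun h => hkk h.symm)]
        have hstep : pvSolve env ((k, v, true) :: ts') = pvSolve (env.insert k v) ts' := by
          simp [pvSolve, hget]
        rw [hstep, ih (env.insert k v), List.map_cons]
        simp only [hpt]
        exact (pv_ball_cons k _ _ (fun h => hnil (env.insert k v) k h)).symm
      | false =>
        by_cases hkv : k = v
        · -- exact literal match, nothing recorded
          have hpt : ∀ k', pvCheckSeq (env.get? k') k' (pvOccs ((k, v, false) :: ts') k') =
              pvCheckSeq (env.get? k') k' (pvOccs ts' k') := by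
            intro k'
            rw [hocc k']
            by_cases hkk : k = k'
            · subst hkk; rw [if_pos rfl, hget]; simp [pvCheckSeq, hkv]
            · rw [if_neg hkk]
          have hstep : pvSolve env ((k, v, false) :: ts') = pvSolve env ts' := by
            have hb : (k == v) = true := by simp [hkv]
            simp [pvSolve, hget, hb]
          rw [hstep, ih env, List.map_cons]
          simp only [hpt]
          exact (pv_ball_cons k _ _ (fun h => hnil env k h)).symm
        · have hstep : pvSolve env ((k, v, false) :: ts') = false := by
            simp [pvSolve, hget, hkv, beq_iff_eq]
          rw [hstep]
          constructor
          · intro hs; cases hs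
          · intro hall
            have hk := hall k (by simp)
            rw [hocc k, if_pos rfl] at hk
            simp only [pvCheckSeq, hget, Bool.false_eq_true, if_false, Bool.and_eq_true,
              beq_iff_eq] at hk
            exact (hkv hk.1.symm).elim

-- ===== VERDICT (by name: the statement is the Claim_ definition above) =====
theorem match_template_pattern_py_spec : Claim_equal_match_template_pattern_py := by
  intro pattern args _
  unfold Spec_match_template_pattern_py match_template_pattern_py match_template_pattern_py_alt
  split_ifs with h
  · rfl
  · rw [pvALoop_eq]
    cases hc : pvClassify (pattern.zip args) with
    | none => rfl
    | some ts =>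
      show pvSolve (PySem.Dict.ofList []) ts = _
      rw [Bool.eq_iff_iff, pvSolve_eq_forall ts (PySem.Dict.ofList []), List.all_eq_true]
      have hempty : ∀ k : String, (PySem.Dict.ofList ([] : List (String × String))).get? k = none := by
        intro k; exact PySem.Dict.get?_empty k
      constructor
      · intro hall k hk
        rw [pvKeyOk_eq]
        have := hall k ((PySem.List.mem_dedup _ _).mp hk)
        rwa [hempty k] at this
      · intro hall k hk
        rw [hempty k]
        have := hall k ((PySem.List.mem_dedup _ _).mpr hk)
        rwa [pvKeyOk_eq] at this
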